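-- pv_equiv track=rewrite | github.com/getuka/furigana-spans | furigana_spans/japanese_numbers.py | to_sino_kana
-- ===== SOURCE A (Python) =====
-- def to_sino_kana(number: int) -> str:
--     """Convert an integer into a Sino-Japanese Hiragana reading."""
--     if number == 0:
--         return "ぜろ"
--     if number < 0:
--         raise ValueError("Negative numbers are not supported")
--     parts: list[str] = []
--     for unit_value, unit_reading in (
--         (1_000_000_000_000, "ちょう"),
--         (100_000_000, "おく"),
--         (10_000, "まん"),
--     ):
--         if number >= unit_value:
--             high = number // unit_value
--             parts.append(_under_10000_to_kana(high))
--             parts.append(unit_reading)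
--             number %= unit_value
--     if number:
--         parts.append(_under_10000_to_kana(number))
--     return "".join(parts)
--
-- def _under_10000_to_kana(number: int) -> str:
--     parts: list[str] = []
--     thousands = number // 1000
--     hundreds = (number % 1000) // 100
--     tens = (number % 100) // 10
--     ones = number % 10
--
--     if thousands:
--         parts.append({1: "せん", 3: "さんぜん", 8: "はっせん"}.get(thousands, _digit_kana(thousands) + "せん"))
--     if hundreds:
--         parts.append({1: "ひゃく", 3: "さんびゃく", 6: "ろっぴゃく", 8: "はっぴゃく"}.get(hundreds, _digit_kana(hundreds) + "ひゃく"))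
--     if tens:
--         parts.append("じゅう" if tens == 1 else _digit_kana(tens) + "じゅう")
--     if ones:
--         parts.append(_digit_kana(ones))
--     return "".join(parts)
--
-- def _digit_kana(number: int) -> str:
--     return {
--         0: "ぜろ",
--         1: "いち",
--         2: "に",
--         3: "さん",
--         4: "よん",
--         5: "ご",
--         6: "ろく",
--         7: "なな",
--         8: "はち",
--         9: "きゅう",
--     }[number]
-- ===== SOURCE B (Python) =====
-- _READINGS = {1: "いち", 2: "に", 3: "さん", 4: "よん", 5: "ご",
--              6: "ろく", 7: "なな", 8: "はち", 9: "きゅう"}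
--
-- _EUPHONY = {"いちせん": "せん", "さんせん": "さんぜん", "はちせん": "はっせん",
--             "いちひゃく": "ひゃく", "さんひゃく": "さんびゃく",
--             "ろくひゃく": "ろっぴゃく", "はちひゃく": "はっぴゃく",
--             "いちじゅう": "じゅう"}
--
-- _UNITS = ((1_000_000_000_000, "ちょう", True), (100_000_000, "おく", True),
--           (10_000, "まん", True), (1000, "せん", False), (100, "ひゃく", False),
--           (10, "じゅう", False))
--
--
-- def _kana(n: int) -> str:
--     """Recursive descent: peel the largest unit, read head and tail recursively,
--     then patch euphonic changes (and the dropped いち) at the string level."""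
--     for value, unit, big in _UNITS:
--         if n >= value:
--             head = _kana(n // value) + unit
--             if not big:
--                 head = _EUPHONY.get(head, head)
--             return head + _kana(n % value)
--     return "" if n == 0 else _READINGS[n]
--
--
-- def to_sino_kana(number: int) -> str:
--     """Convert an integer into a Sino-Japanese Hiragana reading."""
--     if number == 0:
--         return "ぜろ"
--     if number < 0:
--         raise ValueError("Negative numbers are not supported")
--     return _kana(number)
-- ===== Notes on version B (the rewrite author's own statement) =====
-- stated objective: alternative
-- what changed: Replaces A's per-group digit extraction (four place divisions with per-digit override dicts inside a 10000-grouping loop) by a single recursive descent over one unified unit list that reads head and tail recursively and applies euphonic changes (and the dropped ichi) as string-level rewrites on the concatenated reading.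
import Mathlib
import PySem

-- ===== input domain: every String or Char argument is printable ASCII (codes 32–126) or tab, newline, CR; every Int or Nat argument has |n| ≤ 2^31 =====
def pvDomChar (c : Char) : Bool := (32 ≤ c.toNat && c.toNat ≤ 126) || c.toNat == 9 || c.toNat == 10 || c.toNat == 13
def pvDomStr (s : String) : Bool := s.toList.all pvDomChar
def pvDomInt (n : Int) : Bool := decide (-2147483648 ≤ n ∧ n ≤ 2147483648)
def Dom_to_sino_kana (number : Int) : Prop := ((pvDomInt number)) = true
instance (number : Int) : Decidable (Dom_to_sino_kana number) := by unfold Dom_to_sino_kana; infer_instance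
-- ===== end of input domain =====

-- B replaces A's staged per-group digit extraction by one recursive descent over a unified unit list
-- with string-level euphonic rewrites (objective: alternative). Return-value equivalence only.

-- ===== PORT A =====
-- _digit_kana's dict lookup raises KeyError outside 0..9; on admitted inputs the argument is always a
-- digit 0..9, so the `.getD ""` default is never taken (exact there).
def pvDigitKana (n : Int) : String :=
  ((PySem.Dict.ofList [((0 : Int), "ぜろ"), (1, "いち"), (2, "に"), (3, "さん"), (4, "よん"),
      (5, "ご"), (6, "ろく"), (7, "なな"), (8, "はち"), (9, "きゅう")]).get? n).getD ""

def pvUnder10000 (number : Int) : String :=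
  let thousands := PySem.Int.floordiv number 1000
  let hundreds := PySem.Int.floordiv (PySem.Int.mod number 1000) 100
  let tens := PySem.Int.floordiv (PySem.Int.mod number 100) 10
  let ones := PySem.Int.mod number 10
  let parts : List String := []
  let parts := if thousands ≠ 0 then
      parts ++ [(PySem.Dict.ofList [((1 : Int), "せん"), (3, "さんぜん"), (8, "はっせん")]).getD
        thousands (pvDigitKana thousands ++ "せん")]
    else parts
  let parts := if hundreds ≠ 0 then
      parts ++ [(PySem.Dict.ofList [((1 : Int), "ひゃく"), (3, "さんびゃく"), (6, "ろっぴゃく"),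
        (8, "はっぴゃく")]).getD hundreds (pvDigitKana hundreds ++ "ひゃく")]
    else parts
  let parts := if tens ≠ 0 then
      parts ++ [if tens = 1 then "じゅう" else pvDigitKana tens ++ "じゅう"]
    else parts
  let parts := if ones ≠ 0 then parts ++ [pvDigitKana ones] else parts
  PySem.Str.join "" parts

def to_sino_kana (number : Int) : String :=
  if number = 0 then "ぜろ"
  else if number < 0 then "" -- Python raises ValueError here; excluded by Pre_to_sino_kana
  else
    let step := fun (st : List String × Int) (u : Int × String) =>
      if st.2 ≥ u.1 then
        (st.1 ++ [pvUnder10000 (PySem.Int.floordiv st.2 u.1), u.2], PySem.Int.mod st.2 u.1)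
      else st
    let st := [((1000000000000 : Int), "ちょう"), (100000000, "おく"), (10000, "まん")].foldl step ([], number)
    let parts := if st.2 ≠ 0 then st.1 ++ [pvUnder10000 st.2] else st.1
    PySem.Str.join "" parts

-- ===== PORT B =====
def bReadings : PySem.Dict Int String := PySem.Dict.ofList
  [((1 : Int), "いち"), (2, "に"), (3, "さん"), (4, "よん"), (5, "ご"),
   (6, "ろく"), (7, "なな"), (8, "はち"), (9, "きゅう")]

def bEuphony : PySem.Dict String String := PySem.Dict.ofList
  [("いちせん", "せん"), ("さんせん", "さんぜん"), ("はちせん", "はっせん"),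
   ("いちひゃく", "ひゃく"), ("さんひゃく", "さんびゃく"),
   ("ろくひゃく", "ろっぴゃく"), ("はちひゃく", "はっぴゃく"),
   ("いちじゅう", "じゅう")]

-- _EUPHONY.get(head, head)
def bFix (s : String) : String := bEuphony.getD s s

-- _kana: the fuel argument only totalizes the recursion (Python has none); fuel 16 exceeds the
-- recursion depth on every input admitted by Dom ∧ Pre, so the port is exact there.
-- _READINGS[n] raises KeyError for n < 0 (never reached on admitted inputs): `.getD ""` there.
def bKana : Nat → Int → String
  | 0, _ => ""
  | f + 1, n =>
    if n ≥ 1000000000000 then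
      bKana f (PySem.Int.floordiv n 1000000000000) ++ "ちょう" ++ bKana f (PySem.Int.mod n 1000000000000)
    else if n ≥ 100000000 then
      bKana f (PySem.Int.floordiv n 100000000) ++ "おく" ++ bKana f (PySem.Int.mod n 100000000)
    else if n ≥ 10000 then
      bKana f (PySem.Int.floordiv n 10000) ++ "まん" ++ bKana f (PySem.Int.mod n 10000)
    else if n ≥ 1000 then
      bFix (bKana f (PySem.Int.floordiv n 1000) ++ "せん") ++ bKana f (PySem.Int.mod n 1000)
    else if n ≥ 100 then
      bFix (bKana f (PySem.Int.floordiv n 100) ++ "ひゃく") ++ bKana f (PySem.Int.mod n 100)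
    else if n ≥ 10 then
      bFix (bKana f (PySem.Int.floordiv n 10) ++ "じゅう") ++ bKana f (PySem.Int.mod n 10)
    else if n = 0 then "" else (bReadings.get? n).getD ""

def to_sino_kana_alt (number : Int) : String :=
  if number = 0 then "ぜろ"
  else if number < 0 then "" -- Source B raises ValueError here; excluded by Pre_to_sino_kana
  else bKana 16 number

-- ===== PRECONDITION & SPEC =====
-- A (and B) raise ValueError on negative input; nothing else raises on Dom.
def Pre_to_sino_kana (number : Int) : Prop := 0 ≤ number
instance (number : Int) : Decidable (Pre_to_sino_kana number) := by unfold Pre_to_sino_kana; infer_instance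
def pvWitness_to_sino_kana : Int := 120340567

def Spec_to_sino_kana (number : Int) (out : String) : Prop := out = to_sino_kana_alt number
instance (number : Int) (out : String) : Decidable (Spec_to_sino_kana number out) := by unfold Spec_to_sino_kana; infer_instance

-- ===== CLAIM (what is proved, stated in full; the proofs are below) =====
def Claim_equal_to_sino_kana : Prop := ∀ (number : Int), Dom_to_sino_kana number → Pre_to_sino_kana number → Spec_to_sino_kana number (to_sino_kana number)

-- ===== LEMMAS AND PROOFS =====

-- A's three place chunks, named for the proofs
def chunkSen (d : Int) : String :=
  (PySem.Dict.ofList [((1 : Int), "せん"), (3, "さんぜん"), (8, "はっせん")]).getD d (pvDigitKana d ++ "せん")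
def chunkHyaku (d : Int) : String :=
  (PySem.Dict.ofList [((1 : Int), "ひゃく"), (3, "さんびゃく"), (6, "ろっぴゃく"), (8, "はっぴゃく")]).getD d
    (pvDigitKana d ++ "ひゃく")
def chunkJu (d : Int) : String := if d = 1 then "じゅう" else pvDigitKana d ++ "じゅう"

lemma U_closed (n : Int) (h0 : 0 ≤ n) (h : n < 10000) :
    pvUnder10000 n =
      (if n / 1000 ≠ 0 then chunkSen (n / 1000) else "") ++
      (if n % 1000 / 100 ≠ 0 then chunkHyaku (n % 1000 / 100) else "") ++
      (if n % 100 / 10 ≠ 0 then chunkJu (n % 100 / 10) else "") ++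
      (if n % 10 ≠ 0 then pvDigitKana (n % 10) else "") := by
  have e1 : PySem.Int.floordiv n 1000 = n / 1000 := PySem.Int.floordiv_eq_ediv_of_pos (by norm_num)
  have e2 : PySem.Int.floordiv (PySem.Int.mod n 1000) 100 = n % 1000 / 100 := by
    rw [PySem.Int.mod_eq_emod_of_pos (by norm_num), PySem.Int.floordiv_eq_ediv_of_pos (by norm_num)]
  have e3 : PySem.Int.floordiv (PySem.Int.mod n 100) 10 = n % 100 / 10 := by
    rw [PySem.Int.mod_eq_emod_of_pos (by norm_num), PySem.Int.floordiv_eq_ediv_of_pos (by norm_num)]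
  have e4 : PySem.Int.mod n 10 = n % 10 := PySem.Int.mod_eq_emod_of_pos (by norm_num)
  unfold pvUnder10000 chunkSen chunkHyaku chunkJu
  simp only [e1, e2, e3, e4]
  split_ifs <;>
    (apply String.toList_inj.mp
     simp [PySem.Str.join, PySem.Chars.join, List.intercalate])

lemma kana_zero (f : Nat) : bKana (f + 1) 0 = "" := by simp [bKana]

lemma kana_digit (f : Nat) (d : Int) (h1 : 0 < d) (h2 : d < 10) :
    bKana (f + 1) d = pvDigitKana d := by
  interval_cases d <;> simp [bKana, pvDigitKana] <;> decide

lemma fix_ju (d : Int) (h1 : 0 < d) (h2 : d < 10) :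
    bFix (pvDigitKana d ++ "じゅう") = chunkJu d := by
  interval_cases d <;> decide

lemma fix_hyaku (d : Int) (h1 : 0 < d) (h2 : d < 10) :
    bFix (pvDigitKana d ++ "ひゃく") = chunkHyaku d := by
  interval_cases d <;> decide

lemma fix_sen (d : Int) (h1 : 0 < d) (h2 : d < 10) :
    bFix (pvDigitKana d ++ "せん") = chunkSen d := by
  interval_cases d <;> decide

lemma kana_lt10 (f : Nat) (n : Int) (h0 : 0 ≤ n) (h : n < 10) :
    bKana (f + 1) n = pvUnder10000 n := by
  rcases eq_or_lt_of_le h0 with h' | h'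
  · rw [← h', kana_zero]; decide
  · rw [kana_digit f n h' h, U_closed n h0 (by omega),
        show n / 1000 = 0 from by omega, show n % 1000 / 100 = 0 from by omega,
        show n % 100 / 10 = 0 from by omega, show n % 10 = n from by omega]
    simp [h'.ne']

lemma kana_lt100 (f : Nat) (n : Int) (h0 : 0 ≤ n) (h : n < 100) :
    bKana (f + 2) n = pvUnder10000 n := by
  by_cases h10 : n ≥ 10
  · show bKana (f + 1 + 1) n = _
    rw [bKana]
    rw [if_neg (by omega), if_neg (by omega), if_neg (by omega), if_neg (by omega),
        if_neg (by omega), if_pos h10,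
        PySem.Int.floordiv_eq_ediv_of_pos (by norm_num : (0:Int) < 10),
        PySem.Int.mod_eq_emod_of_pos (by norm_num : (0:Int) < 10),
        kana_digit f (n / 10) (by omega) (by omega), fix_ju (n / 10) (by omega) (by omega),
        kana_lt10 f (n % 10) (by omega) (by omega),
        U_closed n h0 (by omega), U_closed (n % 10) (by omega) (by omega)]
    rw [show n / 1000 = 0 from by omega, show n % 1000 / 100 = 0 from by omega,
        show n % 100 / 10 = n / 10 from by omega,
        show n % 10 / 1000 = 0 from by omega, show n % 10 % 1000 / 100 = 0 from by omega,
        show n % 10 % 100 / 10 = 0 from by omega, show n % 10 % 10 = n % 10 from by omega]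
    simp [show n / 10 ≠ 0 from by omega]
  · exact kana_lt10 (f + 1) n h0 (by omega)

lemma kana_lt1000 (f : Nat) (n : Int) (h0 : 0 ≤ n) (h : n < 1000) :
    bKana (f + 3) n = pvUnder10000 n := by
  by_cases h100 : n ≥ 100
  · show bKana (f + 2 + 1) n = _
    rw [bKana]
    rw [if_neg (by omega), if_neg (by omega), if_neg (by omega), if_neg (by omega), if_pos h100,
        PySem.Int.floordiv_eq_ediv_of_pos (by norm_num : (0:Int) < 100),
        PySem.Int.mod_eq_emod_of_pos (by norm_num : (0:Int) < 100),
        kana_digit (f + 1) (n / 100) (by omega) (by omega), fix_hyaku (n / 100) (by omega) (by omega),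
        kana_lt100 f (n % 100) (by omega) (by omega),
        U_closed n h0 (by omega), U_closed (n % 100) (by omega) (by omega)]
    rw [show n / 1000 = 0 from by omega, show n % 1000 / 100 = n / 100 from by omega,
        show n % 100 / 1000 = 0 from by omega, show n % 100 % 1000 / 100 = 0 from by omega,
        show n % 100 % 100 / 10 = n % 100 / 10 from by omega,
        show n % 100 % 10 = n % 10 from by omega]
    simp [String.append_assoc, show n / 100 ≠ 0 from by omega]
  · exact kana_lt100 (f + 1) n h0 (by omega)

lemma kana_lt10000 (f : Nat) (n : Int) (h0 : 0 ≤ n) (h : n < 10000) :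
    bKana (f + 4) n = pvUnder10000 n := by
  by_cases h1000 : n ≥ 1000
  · show bKana (f + 3 + 1) n = _
    rw [bKana]
    rw [if_neg (by omega), if_neg (by omega), if_neg (by omega), if_pos h1000,
        PySem.Int.floordiv_eq_ediv_of_pos (by norm_num : (0:Int) < 1000),
        PySem.Int.mod_eq_emod_of_pos (by norm_num : (0:Int) < 1000),
        kana_digit (f + 2) (n / 1000) (by omega) (by omega), fix_sen (n / 1000) (by omega) (by omega),
        kana_lt1000 f (n % 1000) (by omega) (by omega),
        U_closed n h0 (by omega), U_closed (n % 1000) (by omega) (by omega)]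
    rw [show n % 1000 / 1000 = 0 from by omega,
        show n % 1000 % 1000 / 100 = n % 1000 / 100 from by omega,
        show n % 1000 % 100 / 10 = n % 100 / 10 from by omega,
        show n % 1000 % 10 = n % 10 from by omega]
    simp [String.append_assoc, show n / 1000 ≠ 0 from by omega]
  · exact kana_lt1000 (f + 1) n h0 (by omega)

lemma kana_lt1e8 (f : Nat) (n : Int) (h0 : 0 ≤ n) (h : n < 100000000) :
    bKana (f + 5) n =
      (if n ≥ 10000 then pvUnder10000 (n / 10000) ++ "まん" else "") ++ pvUnder10000 (n % 10000) := by
  by_cases h4 : n ≥ 10000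
  · show bKana (f + 4 + 1) n = _
    rw [bKana]
    rw [if_neg (by omega), if_neg (by omega), if_pos h4,
        PySem.Int.floordiv_eq_ediv_of_pos (by norm_num : (0:Int) < 10000),
        PySem.Int.mod_eq_emod_of_pos (by norm_num : (0:Int) < 10000),
        kana_lt10000 f (n / 10000) (by omega) (by omega),
        kana_lt10000 f (n % 10000) (by omega) (by omega), if_pos h4]
  · rw [if_neg h4, kana_lt10000 (f + 1) n h0 (by omega),
        show n % 10000 = n from by omega]
    simp

lemma U_zero : pvUnder10000 0 = "" := by decide

theorem to_sino_kana_spec_aux (n : Int) (h0 : 0 < n) (h : n ≤ 2147483648) :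
    to_sino_kana n = to_sino_kana_alt n := by
  have e1 : ∀ a : Int, PySem.Int.floordiv a 10000 = a / 10000 := fun a =>
    PySem.Int.floordiv_eq_ediv_of_pos (by norm_num)
  have e2 : ∀ a : Int, PySem.Int.floordiv a 100000000 = a / 100000000 := fun a =>
    PySem.Int.floordiv_eq_ediv_of_pos (by norm_num)
  have e4 : ∀ a : Int, PySem.Int.mod a 10000 = a % 10000 := fun a =>
    PySem.Int.mod_eq_emod_of_pos (by norm_num)
  have e5 : ∀ a : Int, PySem.Int.mod a 100000000 = a % 100000000 := fun a =>
    PySem.Int.mod_eq_emod_of_pos (by norm_num)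
  unfold to_sino_kana to_sino_kana_alt
  rw [if_neg (by omega : ¬ n = 0), if_neg (by omega : ¬ n < 0),
      if_neg (by omega : ¬ n = 0), if_neg (by omega : ¬ n < 0)]
  by_cases h8 : n ≥ 100000000
  · have hB : bKana 16 n =
        pvUnder10000 (n / 100000000) ++ "おく" ++
          ((if n % 100000000 ≥ 10000 then pvUnder10000 (n % 100000000 / 10000) ++ "まん" else "") ++
            pvUnder10000 (n % 100000000 % 10000)) := by
      show bKana (15 + 1) n = _
      rw [bKana, if_neg (by omega : ¬ n ≥ 1000000000000), if_pos h8, e2, e5,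
          kana_lt10000 11 (n / 100000000) (by omega) (by omega),
          kana_lt1e8 10 (n % 100000000) (by omega) (by omega)]
    rw [hB]
    simp only [List.foldl_cons, List.foldl_nil]
    rw [if_neg (show ¬ n ≥ 1000000000000 from by omega), if_pos h8]
    simp only [List.nil_append, e1, e2, e4, e5]
    rw [show n % 100000000 % 10000 = n % 10000 from by omega]
    by_cases hm : n % 100000000 ≥ 10000
    · rw [if_pos hm, if_pos hm]
      by_cases hz : n % 10000 = 0
      · rw [if_neg (by omega : ¬ n % 10000 ≠ 0), hz, U_zero]
        apply String.toList_inj.mp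
        simp [PySem.Str.join, PySem.Chars.join, List.intercalate]
      · rw [if_pos (by omega : n % 10000 ≠ 0)]
        apply String.toList_inj.mp
        simp [PySem.Str.join, PySem.Chars.join, List.intercalate]
    · rw [if_neg hm, if_neg hm]
      have hz : n % 100000000 = n % 10000 := by omega
      by_cases hz2 : n % 10000 = 0
      · rw [if_neg (by rw [hz]; omega : ¬ n % 100000000 ≠ 0), hz, hz2, U_zero]
        apply String.toList_inj.mp
        simp [PySem.Str.join, PySem.Chars.join, List.intercalate]
      · rw [if_pos (by rw [hz]; omega : n % 100000000 ≠ 0), hz]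
        apply String.toList_inj.mp
        simp [PySem.Str.join, PySem.Chars.join, List.intercalate]
  · have hB : bKana 16 n =
        (if n ≥ 10000 then pvUnder10000 (n / 10000) ++ "まん" else "") ++ pvUnder10000 (n % 10000) := by
      show bKana (11 + 5) n = _
      exact kana_lt1e8 11 n (by omega) (by omega)
    rw [hB]
    simp only [List.foldl_cons, List.foldl_nil]
    rw [if_neg (show ¬ n ≥ 1000000000000 from by omega),
        if_neg (show ¬ n ≥ 100000000 from h8)]
    simp only [List.nil_append, e1, e4]
    by_cases h4 : n ≥ 10000
    · rw [if_pos h4, if_pos h4]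
      by_cases hz : n % 10000 = 0
      · rw [if_neg (by omega : ¬ n % 10000 ≠ 0), hz, U_zero]
        apply String.toList_inj.mp
        simp [PySem.Str.join, PySem.Chars.join, List.intercalate]
      · rw [if_pos (by omega : n % 10000 ≠ 0)]
        apply String.toList_inj.mp
        simp [PySem.Str.join, PySem.Chars.join, List.intercalate]
    · rw [if_neg h4, if_neg h4, if_pos (by omega : n ≠ 0),
          show n % 10000 = n from by omega]
      apply String.toList_inj.mp
      simp [PySem.Str.join, PySem.Chars.join, List.intercalate]

-- ===== VERDICT (by name: the statement is the Claim_ definition above) =====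
theorem to_sino_kana_spec : Claim_equal_to_sino_kana := by
  intro n hdom hpre
  unfold Spec_to_sino_kana
  rcases eq_or_lt_of_le (hpre : (0:Int) ≤ n) with h | h
  · simp [to_sino_kana, to_sino_kana_alt, ← h]
  · have hd : n ≤ 2147483648 := by
      have := of_decide_eq_true hdom
      omega
    exact to_sino_kana_spec_aux n h hd
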